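-- pv_equiv track=rewrite | github.com/erbth/tslb | python/tslb/parse_utils.py | split_on_number_edge
-- ===== SOURCE A (Python) =====
-- def split_on_number_edge(text):
--     """
--     Split a string on number-letter and letter-number edges.
--
--     i.e. '10gh434t' --> [ '10', 'gh', '434', 't' ]
--     """
--     if text is None:
--         return None
--
--     l = []
--
--     buf = ''
--     last_num = None
--
--     for c in text:
--         if last_num is None:
--             buf += c
--             last_num = c >= '0' and c <= '9'
--
--         else:
--             if last_num:
--                 if c >= '0' and c <= '9':
--                     buf += c
--                 else:
--                     last_num = False
--                     l.append(buf)
--                     buf=c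
--             else:
--                 if c < '0' or c > '9':
--                     buf += c
--                 else:
--                     last_num = True
--                     l.append(buf)
--                     buf=c
--
--     l.append(buf)
--
--     return l
-- ===== SOURCE B (Python) =====
-- def split_on_number_edge(text):
--     if text is None:
--         return None
--     cuts = [0] + [i for i in range(1, len(text))
--                   if ('0' <= text[i] <= '9') != ('0' <= text[i - 1] <= '9')] + [len(text)]
--     return [text[a:b] for a, b in zip(cuts, cuts[1:])]
-- ===== Notes on version B (the rewrite author's own statement) =====
-- stated objective: alternative
-- what changed: Replaced A's single-pass buffer-and-flag state machine by a staged computation: first build the list of boundary indices where digit-ness flips between adjacent characters, then slice the string between consecutive cuts.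
import Mathlib
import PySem

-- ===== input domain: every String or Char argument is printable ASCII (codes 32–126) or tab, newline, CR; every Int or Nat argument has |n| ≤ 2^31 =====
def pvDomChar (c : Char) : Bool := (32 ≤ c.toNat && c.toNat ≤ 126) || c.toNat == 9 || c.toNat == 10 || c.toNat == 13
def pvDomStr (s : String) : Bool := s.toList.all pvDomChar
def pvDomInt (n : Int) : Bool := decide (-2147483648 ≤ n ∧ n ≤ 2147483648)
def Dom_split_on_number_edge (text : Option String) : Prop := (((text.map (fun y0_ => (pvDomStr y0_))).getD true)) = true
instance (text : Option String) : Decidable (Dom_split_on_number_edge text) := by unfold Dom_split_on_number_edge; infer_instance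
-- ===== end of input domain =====

-- B replaces A's buffer-and-flag state machine by a staged computation: first the list of
-- boundary indices where digit-ness flips, then slicing the string at those cuts (alternative; same cost).

-- ===== PORT A =====
def pvIsDig (c : Char) : Bool := decide ('0' ≤ c) && decide (c ≤ '9')

def pvStepA (st : List String × String × Option Bool) (c : Char) : List String × String × Option Bool :=
  match st with
  | (l, buf, none) => (l, buf.push c, some (pvIsDig c))
  | (l, buf, some ln) =>
    if ln then
      if pvIsDig c then (l, buf.push c, some ln)
      else (l ++ [buf], String.singleton c, some false)
    else
      if !(pvIsDig c) then (l, buf.push c, some ln)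
      else (l ++ [buf], String.singleton c, some true)

def split_on_number_edge (text : Option String) : Option (List String) :=
  match text with
  | none => none
  | some s =>
    let st := s.toList.foldl pvStepA ([], "", none)
    some (st.1 ++ [st.2.1])

-- ===== PORT B =====
-- cuts = [0] + [i for i in range(1, len(text)) if digit(text[i]) != digit(text[i-1])] + [len(text)]
-- (the indices i and i-1 are always in range, so List.getD is exact for text[i]; the slice
-- text[a:b] with 0 ≤ a ≤ b ≤ len(text) is exactly (drop a).take (b - a))
def split_on_number_edge_alt (text : Option String) : Option (List String) :=
  match text with
  | none => none
  | some s =>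
    let cs := s.toList
    let cuts := [0] ++ ((List.range' 1 (cs.length - 1)).filter
        (fun i => pvIsDig (cs.getD i ' ') != pvIsDig (cs.getD (i - 1) ' '))) ++ [cs.length]
    some ((cuts.zip (cuts.drop 1)).map (fun p => String.ofList ((cs.drop p.1).take (p.2 - p.1))))

-- ===== PRECONDITION & SPEC =====
def Spec_split_on_number_edge (text : Option String) (out : Option (List String)) : Prop := out = split_on_number_edge_alt text
instance (text : Option String) (out : Option (List String)) : Decidable (Spec_split_on_number_edge text out) := by unfold Spec_split_on_number_edge; infer_instance

-- ===== CLAIM (what is proved, stated in full; the proofs are below) =====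
def Claim_equal_split_on_number_edge : Prop := ∀ (text : Option String), Dom_split_on_number_edge text → Spec_split_on_number_edge text (split_on_number_edge text)

-- ===== LEMMAS AND PROOFS =====

-- Common description of both programs' output: the maximal digit/non-digit runs.
def pvTakeRun (k : Bool) : List Char → List Char × List Char
  | [] => ([], [])
  | c :: cs =>
    if pvIsDig c == k then
      let p := pvTakeRun k cs
      (c :: p.1, p.2)
    else ([], c :: cs)

theorem pvTakeRun_snd_le (k : Bool) (cs : List Char) : (pvTakeRun k cs).2.length ≤ cs.length := by
  induction cs with
  | nil => simp [pvTakeRun]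
  | cons c cs ih =>
    simp only [pvTakeRun]
    split
    · exact Nat.le_succ_of_le ih
    · simp

def pvGroups : List Char → List (List Char)
  | [] => []
  | c :: cs =>
    let p := pvTakeRun (pvIsDig c) cs
    (c :: p.1) :: pvGroups p.2
termination_by l => l.length
decreasing_by simpa using Nat.lt_succ_of_le (pvTakeRun_snd_le _ cs)

theorem pvTakeRun_append (k : Bool) (cs : List Char) :
    (pvTakeRun k cs).1 ++ (pvTakeRun k cs).2 = cs := by
  induction cs with
  | nil => simp [pvTakeRun]
  | cons c cs ih =>
    simp only [pvTakeRun]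
    split
    · simpa using ih
    · rfl

-- A's fold produces the runs
theorem pv_main (cs : List Char) : ∀ (l : List String) (buf : List Char) (k : Bool),
    (let st := cs.foldl pvStepA (l, String.ofList buf, some k); st.1 ++ [st.2.1])
      = l ++ (String.ofList (buf ++ (pvTakeRun k cs).1))
          :: ((pvGroups (pvTakeRun k cs).2).map (fun g => String.ofList g)) := by
  induction cs with
  | nil => intro l buf k; simp [pvTakeRun, pvGroups]
  | cons c cs ih =>
    intro l buf k
    by_cases h : pvIsDig c = k
    · subst h
      have hstep : pvStepA (l, String.ofList buf, some (pvIsDig c)) c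
          = (l, String.ofList (buf ++ [c]), some (pvIsDig c)) := by
        cases hd : pvIsDig c <;> simp [pvStepA, hd, String.push, String.ofList]
      simp only [List.foldl_cons, hstep, ih, pvTakeRun, beq_self_eq_true, if_true]
      simp
    · have hstep : pvStepA (l, String.ofList buf, some k) c
          = (l ++ [String.ofList buf], String.ofList [c], some (pvIsDig c)) := by
        cases hk : k <;> cases hd : pvIsDig c <;>
          simp_all [pvStepA, String.singleton, String.push, String.ofList]
      have hne : (pvIsDig c == k) = false := by simp [h]
      simp only [List.foldl_cons, hstep, ih, pvTakeRun, hne]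
      simp [pvGroups]

-- B-side abbreviations (the port inlines these expressions)
def pvBnds (cs : List Char) : List Nat :=
  (List.range' 1 (cs.length - 1)).filter
    (fun i => pvIsDig (cs.getD i ' ') != pvIsDig (cs.getD (i - 1) ' '))

def pvCuts (cs : List Char) : List Nat := 0 :: (pvBnds cs ++ [cs.length])

def pvChunks (cs : List Char) : List (List Char) :=
  ((pvCuts cs).zip ((pvCuts cs).drop 1)).map (fun p => (cs.drop p.1).take (p.2 - p.1))

theorem range'_two_eq (m : Nat) : List.range' 2 m = (List.range' 1 m).map (· + 1) := by
  have := List.map_add_range' (a := 1) (s := 1) (n := m)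
  rw [← this]; apply List.map_congr_left; intro a _; omega

-- shifting the boundary list past the first character
theorem pvBnds_cons_cons (c d : Char) (t : List Char) :
    pvBnds (c :: d :: t)
      = (if pvIsDig d != pvIsDig c then [1] else []) ++ (pvBnds (d :: t)).map (· + 1) := by
  unfold pvBnds
  simp only [List.length_cons, Nat.add_sub_cancel]
  rw [List.range'_succ, List.filter_cons, range'_two_eq, List.filter_map]
  have hcong : ∀ i ∈ List.range' 1 t.length,
      ((fun i => pvIsDig ((c :: d :: t).getD i ' ') != pvIsDig ((c :: d :: t).getD (i - 1) ' ')) ∘ (· + 1)) i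
        = (fun i => pvIsDig ((d :: t).getD i ' ') != pvIsDig ((d :: t).getD (i - 1) ' ')) i := by
    intro i hi
    have h1 : 1 ≤ i := (List.mem_range'_1.mp hi).1
    obtain ⟨j, rfl⟩ := Nat.exists_eq_add_of_le h1
    simp [Nat.add_comm 1 j, List.getD]
  rw [List.filter_congr hcong]
  by_cases h : (pvIsDig d != pvIsDig c)
  · simp [List.getD, h]
  · simp only [List.getD_cons_succ, List.getD_cons_zero] at *
    simp [h]

-- the boundary list in terms of the first maximal run
theorem pvBnds_run (c : Char) (rest : List Char) :
    pvBnds (c :: rest)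
      = (if (pvTakeRun (pvIsDig c) rest).2 = [] then []
         else ((pvTakeRun (pvIsDig c) rest).1.length + 1)
           :: (pvBnds (pvTakeRun (pvIsDig c) rest).2).map (· + ((pvTakeRun (pvIsDig c) rest).1.length + 1))) := by
  induction rest generalizing c with
  | nil => simp [pvBnds, pvTakeRun]
  | cons d t ih =>
    by_cases hd : pvIsDig d = pvIsDig c
    · have hne : (pvIsDig d != pvIsDig c) = false := by simp [hd]
      rw [pvBnds_cons_cons, hne]
      simp only [pvTakeRun, hd, beq_self_eq_true, if_true]
      rw [ih d, hd]
      by_cases hp : (pvTakeRun (pvIsDig c) t).2 = []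
      · simp [hp]
      · simp only [hp, if_false, List.map_cons, List.map_map, List.length_cons,
          Bool.false_eq_true, List.nil_append]
        congr 1
    · have hne : (pvIsDig d != pvIsDig c) = true := by simp [hd]
      rw [pvBnds_cons_cons, hne]
      have : (pvIsDig d == pvIsDig c) = false := by simp [hd]
      simp [pvTakeRun, this]

-- slicing at the cuts yields exactly the runs
theorem pvChunks_aux : ∀ (n : Nat) (cs : List Char), cs.length ≤ n → cs ≠ [] →
    pvChunks cs = pvGroups cs := by
  intro n
  induction n with
  | zero => intro cs hle hne; cases cs <;> simp_all
  | succ n ih =>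
    intro cs hle hne
    match cs with
    | c :: rest =>
      have hsplit := pvTakeRun_append (pvIsDig c) rest
      by_cases hp : (pvTakeRun (pvIsDig c) rest).2 = []
      · -- single run: the whole string is one chunk
        have hrun : (pvTakeRun (pvIsDig c) rest).1 = rest := by
          rw [hp] at hsplit; simpa using hsplit
        rw [pvGroups]
        simp only [hp, pvGroups]
        simp [pvChunks, pvCuts, pvBnds_run, hp, hrun]
      · set p := pvTakeRun (pvIsDig c) rest with hpdef
        set r := p.1.length + 1 with hrdef
        have hlen : (c :: rest).length = r + p.2.length := by
          simp [hrdef, ← hsplit]; omega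
        have hcuts : pvCuts (c :: rest) = 0 :: (pvCuts p.2).map (· + r) := by
          rw [pvCuts, pvBnds_run]
          simp only [← hpdef, hp, if_false, pvCuts, List.map_cons, List.map_append]
          simp [hlen, Nat.add_comm]
          exact ⟨rfl, fun a _ => rfl⟩
        have hdropr : (c :: rest).drop r = p.2 := by
          have h2 : (c :: rest) = (c :: p.1) ++ p.2 := by rw [← hsplit]; rfl
          rw [h2, hrdef, show p.1.length + 1 = (c :: p.1).length by simp, List.drop_left]
        have htaker : (c :: rest).take r = c :: p.1 := by
          have h2 : (c :: rest) = (c :: p.1) ++ p.2 := by rw [← hsplit]; rfl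
          rw [h2, hrdef, show p.1.length + 1 = (c :: p.1).length by simp, List.take_left]
        have hmain : pvChunks (c :: rest) = ((c :: rest).take r) :: pvChunks p.2 := by
          rw [pvChunks, hcuts]
          have hc2 : pvCuts p.2 = 0 :: (pvBnds p.2 ++ [p.2.length]) := rfl
          rw [hc2]
          simp only [List.map_cons, List.drop_succ_cons, List.drop_zero, List.zip_cons_cons,
            List.map_cons, Nat.zero_add, Nat.sub_zero]
          congr 1
          rw [show (r :: List.map (fun x => x + r) (pvBnds p.2 ++ [p.2.length]))
                = List.map (fun x => x + r) (pvCuts p.2) by simp [pvCuts]]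
          rw [List.zip_map, List.map_map, pvChunks, hc2]
          simp only [List.drop_succ_cons, List.drop_zero]
          apply List.map_congr_left
          intro a _
          obtain ⟨a1, a2⟩ := a
          simp only [Function.comp, Prod.map]
          rw [Nat.add_sub_add_right, Nat.add_comm a1 r, ← List.drop_drop, hdropr]
        rw [hmain, htaker, pvGroups]
        have hplen : p.2.length ≤ n := by
          have hs := pvTakeRun_snd_le (pvIsDig c) rest
          rw [← hpdef] at hs
          simp only [List.length_cons] at hle
          omega
        rw [ih p.2 hplen hp]

-- B's port, expressed through pvChunks
theorem pv_alt_eq (s : String) :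
    split_on_number_edge_alt (some s)
      = some ((pvChunks s.toList).map (fun g => String.ofList g)) := by
  simp [split_on_number_edge_alt, pvChunks, pvCuts, pvBnds, List.map_map, Function.comp]

-- ===== VERDICT (by name: the statement is the Claim_ definition above) =====
theorem split_on_number_edge_spec : Claim_equal_split_on_number_edge := by
  intro text _
  unfold Spec_split_on_number_edge
  match text with
  | none => rfl
  | some s =>
    rw [pv_alt_eq]
    unfold split_on_number_edge
    simp only
    match hcs : s.toList with
    | [] => simp [pvChunks, pvCuts, pvBnds]
    | c :: cs =>
      have h1 : pvStepA ([], "", none) c = ([], String.ofList [c], some (pvIsDig c)) := by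
        simp [pvStepA, String.push, String.ofList]
      simp only [List.foldl_cons, h1]
      have := pv_main cs [] [c] (pvIsDig c)
      simp only [this]
      rw [pvChunks_aux (c :: cs).length (c :: cs) le_rfl (by simp)]
      simp [pvGroups]
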